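-- pv_equiv track=rewrite | github.com/Hackathon-FakePage/Hack_the_Crisis | backend/computational/find_words.py | find_all_indices
-- ===== SOURCE A (Python) =====
-- allowed_chars = [' ', '-', ',', '.', ';', ':', '?', '!', '/', '+', '=', '(', ')', '{', '}', '[', ']', '"', '*', '^', '$', '#', '@', '`', '\n']
--
-- def find_all_indices(input_str, search_str):
--     word_indices = []
--     length = len(input_str)
--     index = 0
--     while index < length:
--         i = input_str.find(search_str, index)
--         if i == -1:
--             return word_indices
--         elif i > 0:
--             preceeding_char = input_str[i-1]
--             following_char = input_str[i + len(search_str)]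
--             if preceeding_char in allowed_chars and following_char in allowed_chars:
--                 word_indices.append(i)
--         else: # case of first word in text
--             following_char = input_str[i + len(search_str)]
--             if following_char in allowed_chars:
--                 word_indices.append(i)
--         index = i + 1
--     return word_indices
-- ===== SOURCE B (Python) =====
-- allowed_chars = [' ', '-', ',', '.', ';', ':', '?', '!', '/', '+', '=', '(', ')', '{', '}', '[', ']', '"', '*', '^', '$', '#', '@', '`', '\n']
--
-- def find_all_indices(input_str, search_str):
--     allowed = set(allowed_chars)
--     n = len(input_str)
--     m = len(search_str)
--     result = []
--     for i in range(n):
--         if input_str.startswith(search_str, i):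
--             before_ok = i == 0 or input_str[i - 1] in allowed
--             j = i + m
--             after_ok = j == n or input_str[j] in allowed
--             if before_ok and after_ok:
--                 result.append(i)
--     return result
-- ===== Notes on version B (the rewrite author's own statement) =====
-- stated objective: idiomatic
-- what changed: Replaced A's str.find/advance-by-one while-loop (with its separate i==0 and i>0 boundary branches and unguarded following-char access) by a single idiomatic scan over all start positions using startswith and a uniform boundary test that treats the string ends as word boundaries, with allowed_chars held in a set.
-- crash fix: When search_str is nonempty and a suffix of input_str, A raises IndexError reading the character after the trailing match; B returns the whole-word indices, counting end-of-string as a boundary (e.g. ('ab cd','cd') -> [3]). — e.g. on find_all_indices("ab cd", "cd"): A raises IndexError, B returns [3]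
import Mathlib
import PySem

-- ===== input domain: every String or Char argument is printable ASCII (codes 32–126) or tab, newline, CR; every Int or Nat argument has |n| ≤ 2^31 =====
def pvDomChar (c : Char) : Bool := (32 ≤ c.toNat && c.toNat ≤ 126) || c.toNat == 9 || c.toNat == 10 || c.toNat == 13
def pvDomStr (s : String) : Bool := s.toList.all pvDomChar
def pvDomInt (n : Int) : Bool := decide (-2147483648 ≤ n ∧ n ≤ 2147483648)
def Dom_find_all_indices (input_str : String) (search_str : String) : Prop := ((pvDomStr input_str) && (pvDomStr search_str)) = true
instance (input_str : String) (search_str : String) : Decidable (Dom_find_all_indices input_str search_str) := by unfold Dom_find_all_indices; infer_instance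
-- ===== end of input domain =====

-- B replaces A's str.find/advance-by-one while-loop by an idiomatic single scan over all start
-- positions with startswith and an end-of-string-aware boundary test (equal on all inputs where
-- A returns; where A raises IndexError on a trailing match, B returns the whole-word indices).

-- ===== PORT A =====
-- the module constant allowed_chars (shared module context of both Pythons)
def pvAllowed : List Char :=
  [' ', '-', ',', '.', ';', ':', '?', '!', '/', '+', '=', '(', ')', '{', '}', '[', ']', '"', '*', '^', '$', '#', '@', '`', '\n']

-- A's loop body after a match at index iN (the `none` branches are Python's IndexError, excluded by Pre_)
def pvStep (s sub : List Char) (iN : Nat) (acc : List Int) : List Int :=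
  if iN > 0 then
    match PySem.List.pyGet? s ((iN : Int) - 1), PySem.List.pyGet? s ((iN : Int) + sub.length) with
    | some pc, some fc => if pc ∈ pvAllowed ∧ fc ∈ pvAllowed then acc ++ [(iN : Int)] else acc
    | _, _ => acc  -- IndexError in Python: outside Pre_
  else
    match PySem.List.pyGet? s ((iN : Int) + sub.length) with
    | some fc => if fc ∈ pvAllowed then acc ++ [(iN : Int)] else acc
    | none => acc  -- IndexError in Python: outside Pre_

-- A's while-loop: index advances to (found index)+1 each turn
def pvFindLoop (s sub : List Char) (index : Nat) (acc : List Int) : List Int :=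
  if hlt : index < s.length then
    if hneg : PySem.Chars.findFrom s sub (index : Int) none = -1 then acc
    else
      pvFindLoop s sub ((PySem.Chars.findFrom s sub (index : Int) none).toNat + 1)
        (pvStep s sub (PySem.Chars.findFrom s sub (index : Int) none).toNat acc)
  else acc
termination_by s.length - index
decreasing_by
  have h := (PySem.Chars.findFrom_natCast_spec s sub index (le_of_lt hlt) hneg).1
  omega

def find_all_indices (input_str : String) (search_str : String) : List Int :=
  pvFindLoop input_str.toList search_str.toList 0 []

-- ===== PORT B =====
def find_all_indices_alt (input_str : String) (search_str : String) : List Int :=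
  let s := input_str.toList
  let sub := search_str.toList
  let allowed : PySem.Set Char := PySem.Set.ofList pvAllowed
  let n := s.length
  let m := sub.length
  (List.range n).foldl
    (fun acc i =>
      if PySem.Chars.startswith (s.drop i) sub then
        let before_ok := i == 0 || PySem.Set.contains allowed (s.getD (i - 1) ' ')
        let j := i + m
        let after_ok := j == n || PySem.Set.contains allowed (s.getD j ' ')
        if before_ok && after_ok then acc ++ [(i : Int)] else acc
      else acc) []

-- ===== PRECONDITION & SPEC =====
-- Pre_ excludes exactly the inputs where A raises IndexError: a nonempty search_str that is a
-- suffix of input_str (the match at the end makes A read one character past the string).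
def Pre_find_all_indices (input_str : String) (search_str : String) : Prop :=
  search_str.toList = [] ∨ ¬ search_str.toList <:+ input_str.toList
instance (input_str : String) (search_str : String) : Decidable (Pre_find_all_indices input_str search_str) := by
  unfold Pre_find_all_indices; infer_instance

def pvWitness_find_all_indices : String × String := ("ab cd x", "cd")

-- On inputs whose nonempty search_str is a suffix of input_str A raises IndexError; B returns the
-- whole-word indices, counting the end of the string as a word boundary.
def Raises_find_all_indices (input_str : String) (search_str : String) : Prop :=
  search_str.toList ≠ [] ∧ search_str.toList <:+ input_str.toList
instance (input_str : String) (search_str : String) : Decidable (Raises_find_all_indices input_str search_str) := by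
  unfold Raises_find_all_indices; infer_instance
def pvRaiseWitness_find_all_indices : String × String := ("ab cd", "cd")
def pvRaiseWitnessOut_find_all_indices : List Int := [3]

def Spec_find_all_indices (input_str : String) (search_str : String) (out : List Int) : Prop :=
  out = find_all_indices_alt input_str search_str
instance (input_str : String) (search_str : String) (out : List Int) : Decidable (Spec_find_all_indices input_str search_str out) := by
  unfold Spec_find_all_indices; infer_instance

-- ===== CLAIM (what is proved, stated in full; the proofs are below) =====
def Claim_equal_find_all_indices : Prop := ∀ (input_str : String) (search_str : String), Dom_find_all_indices input_str search_str → Pre_find_all_indices input_str search_str → Spec_find_all_indices input_str search_str (find_all_indices input_str search_str)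

def Claim_raises_find_all_indices : Prop := (∀ (input_str : String) (search_str : String), Dom_find_all_indices input_str search_str → Raises_find_all_indices input_str search_str → ¬ Pre_find_all_indices input_str search_str) ∧ (Dom_find_all_indices (pvRaiseWitness_find_all_indices.1) (pvRaiseWitness_find_all_indices.2) ∧ Raises_find_all_indices (pvRaiseWitness_find_all_indices.1) (pvRaiseWitness_find_all_indices.2) ∧ find_all_indices_alt (pvRaiseWitness_find_all_indices.1) (pvRaiseWitness_find_all_indices.2) = pvRaiseWitnessOut_find_all_indices)

-- ===== LEMMAS AND PROOFS =====

-- B's per-position test, as one boolean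
def pvQ (s sub : List Char) (i : Nat) : Bool :=
  PySem.Chars.startswith (s.drop i) sub &&
  ((i == 0 || PySem.Set.contains (PySem.Set.ofList pvAllowed) (s.getD (i - 1) ' ')) &&
   ((i + sub.length == s.length) || PySem.Set.contains (PySem.Set.ofList pvAllowed) (s.getD (i + sub.length) ' ')))

-- the indices ≥ index that B would report
def pvMatches (s sub : List Char) (index : Nat) : List Int :=
  ((List.range' index (s.length - index)).filter (pvQ s sub)).map (fun i => (i : Int))

lemma pvB_eq (a b : String) :
    find_all_indices_alt a b =
      ((List.range a.toList.length).filter (pvQ a.toList b.toList)).map (fun i => (i : Int)) := by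
  show (List.range a.toList.length).foldl _ [] = _
  have h : ∀ (acc : List Int) (i : Nat),
      (if PySem.Chars.startswith (a.toList.drop i) b.toList then
        if ((i == 0 || PySem.Set.contains (PySem.Set.ofList pvAllowed) (a.toList.getD (i - 1) ' ')) &&
            ((i + b.toList.length == a.toList.length) || PySem.Set.contains (PySem.Set.ofList pvAllowed) (a.toList.getD (i + b.toList.length) ' ')))
        then acc ++ [(i : Int)] else acc
      else acc) = if pvQ a.toList b.toList i then acc ++ [(i : Int)] else acc := by
    intro acc i
    unfold pvQ
    cases PySem.Chars.startswith (a.toList.drop i) b.toList <;> simp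
  calc (List.range a.toList.length).foldl _ ([] : List Int)
      = (List.range a.toList.length).foldl
          (fun acc i => if pvQ a.toList b.toList i then acc ++ [(i : Int)] else acc) [] := by
        apply PySem.List.foldl_congr_mem
        intro acc i _
        exact h acc i
    _ = _ := by
        rw [PySem.List.foldl_append_if]
        simp
        generalize List.filter (pvQ a.toList b.toList) (List.range a.length) = l
        induction l with
        | nil => rfl
        | cons x t ih => simp [ih]

-- positions with no match contribute nothing
lemma pvFilter_nil (s sub : List Char) (lo len : Nat)
    (hno : ∀ k, lo ≤ k → k < lo + len → ¬ sub <+: s.drop k) :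
    (List.range' lo len).filter (pvQ s sub) = [] := by
  rw [List.filter_eq_nil_iff]
  intro k hk
  have hk' := List.mem_range'_1.mp hk
  unfold pvQ
  have : PySem.Chars.startswith (s.drop k) sub = false := by
    cases hsw : PySem.Chars.startswith (s.drop k) sub
    · rfl
    · exact absurd ((PySem.Chars.startswith_iff _ _).mp hsw) (hno k hk'.1 hk'.2)
  simp [this]

-- the main loop invariant: A's loop from index produces exactly B's matches ≥ index
lemma pvLoop_eq (s sub : List Char) (hpre : sub = [] ∨ ¬ sub <:+ s) :
    ∀ (fuel index : Nat) (acc : List Int), s.length - index ≤ fuel →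
      pvFindLoop s sub index acc = acc ++ pvMatches s sub index := by
  intro fuel
  induction fuel with
  | zero =>
    intro index acc hf
    have hge : ¬ index < s.length := by omega
    rw [pvFindLoop, dif_neg hge]
    unfold pvMatches
    have : s.length - index = 0 := by omega
    rw [this]
    simp
  | succ fuel ih =>
    intro index acc hf
    by_cases hlt : index < s.length
    · by_cases hneg : PySem.Chars.findFrom s sub (index : Int) none = -1
      · rw [pvFindLoop, dif_pos hlt, dif_pos hneg]
        have hnomatch : ¬ sub <:+: s.drop index :=
          (PySem.Chars.findFrom_natCast_eq_neg_one_iff s sub index (le_of_lt hlt)).mp hneg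
        unfold pvMatches
        rw [pvFilter_nil s sub index (s.length - index)]
        · simp
        · intro k hk1 _ hpref
          apply hnomatch
          have hdd : sub <+: (s.drop index).drop (k - index) := by
            rw [List.drop_drop]
            have hkk : index + (k - index) = k := by omega
            rw [hkk]
            exact hpref
          exact (PySem.Chars.isIn_iff_infix _ _).mp
            ((PySem.Chars.exists_prefix_drop_iff_isIn sub (s.drop index)).mp ⟨k - index, hdd⟩)
      · -- a match was found at iN
        obtain ⟨h1, h2, h3⟩ := PySem.Chars.findFrom_natCast_spec s sub index (le_of_lt hlt) hneg
        set i : Int := PySem.Chars.findFrom s sub (index : Int) none with hi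
        set iN : Nat := i.toNat with hiN
        have hindex_le : index ≤ iN := by omega
        have hlen : sub.length ≤ s.length - iN := by
          have := h2.length_le
          simpa using this
        have hiN_lt : iN < s.length := by
          rcases hpre with h | h
          · -- sub = []: findFrom finds at index itself
            subst h
            have : i = (index : Int) := by
              rw [hi, PySem.Chars.findFrom_natCast s [] index (le_of_lt hlt)]
              simp [PySem.Chars.find_nil]
            omega
          · -- sub ≠ suffix: the match cannot sit at the very end, and sub ≠ [] here is not needed:
            by_cases hsub : sub = []
            · subst hsub
              have : i = (index : Int) := by
                rw [hi, PySem.Chars.findFrom_natCast s [] index (le_of_lt hlt)]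
                simp [PySem.Chars.find_nil]
              omega
            · have : 0 < sub.length := List.length_pos_iff.mpr hsub
              omega
        have hend : iN + sub.length ≠ s.length := by
          intro heq
          rcases hpre with h | h
          · subst h; simp at heq; omega
          · apply h
            obtain ⟨t, ht⟩ := h2
            have ht0 : t = [] := by
              cases t with
              | nil => rfl
              | cons x xs =>
                exfalso
                have hlen2 := congrArg List.length ht
                simp [List.length_drop] at hlen2
                omega
            rw [ht0, List.append_nil] at ht
            rw [ht]
            exact List.drop_suffix iN s
        have hend_lt : iN + sub.length < s.length := by
          have : iN + sub.length ≤ s.length := by omega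
          omega
        rw [pvFindLoop, dif_pos hlt, dif_neg hneg]
        rw [ih (iN + 1) _ (by omega)]
        -- step = append-if-Q
        have hstep : pvStep s sub iN acc = acc ++ (if pvQ s sub iN then [(iN : Int)] else []) := by
          have hget : ∀ (k : Nat), k < s.length → PySem.List.pyGet? s (k : Int) = some (s.getD k ' ') := by
            intro k hk
            rw [List.getD_eq_getElem?_getD, List.getElem?_eq_getElem hk]
            simp [pysem, hk]
          have hfc : PySem.List.pyGet? s ((iN : Int) + sub.length) = some (s.getD (iN + sub.length) ' ') := by
            have hc : ((iN : Int) + sub.length) = ((iN + sub.length : Nat) : Int) := by push_cast; ring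
            rw [hc]
            exact hget _ hend_lt
          have hsw : PySem.Chars.startswith (s.drop iN) sub = true :=
            (PySem.Chars.startswith_iff _ _).mpr h2
          unfold pvStep pvQ
          by_cases h0 : iN > 0
          · have hiN1 : iN - 1 < s.length := by omega
            have hpc : PySem.List.pyGet? s ((iN : Int) - 1) = some (s.getD (iN - 1) ' ') := by
              have hc : ((iN : Int) - 1) = ((iN - 1 : Nat) : Int) := by omega
              rw [hc]
              exact hget _ hiN1
            rw [if_pos h0, hpc, hfc]
            have hne0 : (iN == 0) = false := by simp; omega
            have hnen : (iN + sub.length == s.length) = false := by simp; omega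
            simp only [hsw, hne0, hnen, Bool.false_or, Bool.true_and]
            have hmem : ∀ c : Char, PySem.Set.contains (PySem.Set.ofList pvAllowed) c = decide (c ∈ pvAllowed) := by
              intro c
              simp [PySem.Set.contains, PySem.Set.mem_ofList]
            rw [hmem, hmem]
            split <;> split <;> simp_all
          · have hiN0 : iN = 0 := by omega
            rw [if_neg h0, hfc]
            have : (iN == 0) = true := by simp [hiN0]
            simp only [hsw, this, Bool.true_or, Bool.true_and]
            have hnen : (iN + sub.length == s.length) = false := by simp; omega
            simp only [hnen, Bool.false_or]
            have hmem : PySem.Set.contains (PySem.Set.ofList pvAllowed) (s.getD (iN + sub.length) ' ') = decide (s.getD (iN + sub.length) ' ' ∈ pvAllowed) := by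
              simp [PySem.Set.contains, PySem.Set.mem_ofList]
            rw [hmem]
            split <;> split <;> simp_all
        rw [hstep]
        -- split the match list at iN
        unfold pvMatches
        have hsplit : List.range' index (s.length - index) =
            List.range' index (iN - index) ++ List.range' iN (s.length - iN) := by
          have := @List.range'_append index (iN - index) (s.length - iN) 1
          rw [one_mul] at this
          have hidx : index + (iN - index) = iN := by omega
          rw [hidx] at this
          rw [this]
          congr 1
          omega
        rw [hsplit, List.filter_append]
        rw [pvFilter_nil s sub index (iN - index) (by intro k hk1 hk2; exact h3 k hk1 (by omega))]
        have hcons : List.range' iN (s.length - iN) = iN :: List.range' (iN + 1) (s.length - (iN + 1)) := by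
          have : s.length - iN = (s.length - (iN + 1)) + 1 := by omega
          rw [this, List.range'_succ]
        rw [hcons]
        rw [List.filter_cons]
        by_cases hq : pvQ s sub iN = true <;> simp [hq, List.append_assoc]
    · rw [pvFindLoop, dif_neg hlt]
      unfold pvMatches
      have : s.length - index = 0 := by omega
      rw [this]
      simp

-- ===== VERDICT (by name: the statement is the Claim_ definition above) =====
theorem find_all_indices_spec : Claim_equal_find_all_indices := by
  intro a b _ hpre
  unfold Spec_find_all_indices
  unfold find_all_indices
  have hpre' : b.toList = [] ∨ ¬ b.toList <:+ a.toList := hpre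
  rw [pvLoop_eq a.toList b.toList hpre' a.toList.length 0 [] (by omega)]
  rw [pvB_eq]
  unfold pvMatches
  simp [List.range_eq_range']

@[simp] theorem find_all_indices_raises : Claim_raises_find_all_indices := by
  unfold Claim_raises_find_all_indices
  constructor
  · intro a b _ hr hp
    rcases hp with h | h
    · exact hr.1 h
    · exact h hr.2
  · refine ⟨by decide, by decide, by decide⟩
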